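-- pv_equiv track=rewrite | github.com/CarlosIrineuCosta/photo-tagger | app/core/medoid.py | _cluster_by_tag
-- ===== SOURCE A (Python) =====
-- from typing import Dict, List, Mapping, Optional, Sequence, Tuple
--
-- def _cluster_by_tag(
--     indices: Sequence[int],
--     tags_per_index: Mapping[int, Sequence[str]],
--     min_cluster_size: int,
-- ) -> List[Tuple[str, List[int]]]:
--     buckets: Dict[str, List[int]] = {}
--     for idx in indices:
--         tags = tags_per_index.get(idx)
--         if not tags:
--             continue
--         for tag in tags:
--             if tag is None:
--                 continue
--             normalized_tag = str(tag).strip().lower()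
--             if not normalized_tag:
--                 continue
--             bucket = buckets.setdefault(normalized_tag, [])
--             if idx not in bucket:
--                 bucket.append(idx)
--
--     clusters: List[Tuple[str, List[int]]] = []
--     for tag, bucket in buckets.items():
--         unique_indices: List[int] = []
--         seen = set()
--         for value in bucket:
--             if value in seen:
--                 continue
--             seen.add(value)
--             unique_indices.append(value)
--         if len(unique_indices) >= min_cluster_size:
--             clusters.append((tag, unique_indices))
--
--     clusters.sort(key=lambda item: (-len(item[1]), item[0]))
--     return clusters
-- ===== SOURCE B (Python) =====
-- from typing import Dict, List, Mapping, Optional, Sequence, Tuple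
--
-- def _cluster_by_tag(
--     indices: Sequence[int],
--     tags_per_index: Mapping[int, Sequence[str]],
--     min_cluster_size: int,
-- ) -> List[Tuple[str, List[int]]]:
--     # one flat pass: (normalized_tag, idx) pairs, same None/strip/lower/empty filters
--     pairs: List[Tuple[str, int]] = []
--     for idx in indices:
--         for tag in (tags_per_index.get(idx) or ()):
--             if tag is None:
--                 continue
--             normalized_tag = str(tag).strip().lower()
--             if normalized_tag:
--                 pairs.append((normalized_tag, idx))
--     # stable sort by tag, then scan runs of equal tags
--     pairs.sort(key=lambda p: p[0])
--     clusters: List[Tuple[str, List[int]]] = []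
--     i, n = 0, len(pairs)
--     while i < n:
--         tag = pairs[i][0]
--         j = i
--         while j < n and pairs[j][0] == tag:
--             j += 1
--         unique_indices = list(dict.fromkeys(p[1] for p in pairs[i:j]))
--         if len(unique_indices) >= min_cluster_size:
--             clusters.append((tag, unique_indices))
--         i = j
--     clusters.sort(key=lambda item: (-len(item[1]), item[0]))
--     return clusters
-- ===== Notes on version B (the rewrite author's own statement) =====
-- stated objective: alternative
-- what changed: B replaces A's incrementally built dict of buckets (with a linear 'idx not in bucket' membership scan per insertion and a per-bucket seen-set pass) by a flat (normalized_tag, idx) pair list that is stably sorted by tag and then grouped by scanning runs of equal tags, deduplicating each group once with dict.fromkeys.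
import Mathlib
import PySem

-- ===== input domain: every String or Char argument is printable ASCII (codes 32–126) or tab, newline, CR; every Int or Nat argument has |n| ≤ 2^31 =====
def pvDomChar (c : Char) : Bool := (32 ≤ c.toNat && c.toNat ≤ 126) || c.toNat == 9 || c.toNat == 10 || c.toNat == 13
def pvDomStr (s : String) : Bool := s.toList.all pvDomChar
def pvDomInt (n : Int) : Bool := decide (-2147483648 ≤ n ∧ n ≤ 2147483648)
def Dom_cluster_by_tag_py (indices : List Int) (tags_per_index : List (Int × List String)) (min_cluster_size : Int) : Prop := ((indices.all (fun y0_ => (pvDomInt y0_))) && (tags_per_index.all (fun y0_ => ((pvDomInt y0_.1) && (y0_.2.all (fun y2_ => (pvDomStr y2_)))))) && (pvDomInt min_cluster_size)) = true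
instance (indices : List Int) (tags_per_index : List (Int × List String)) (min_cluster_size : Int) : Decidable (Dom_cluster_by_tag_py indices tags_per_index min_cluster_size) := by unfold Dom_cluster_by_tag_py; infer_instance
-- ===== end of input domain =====

-- B replaces A's dict-of-buckets-with-membership-scan by a flat (tag, idx) pair list, a stable sort by tag and a run scan; same return value (alternative decomposition).
-- ===== PORT A =====
def cluster_by_tag_py (indices : List Int) (tags_per_index : List (Int × List String)) (min_cluster_size : Int) : List (String × List Int) :=
  let tpi : PySem.Dict Int (List String) := PySem.Dict.mk tags_per_index
  let buckets : PySem.Dict String (List Int) :=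
    indices.foldl (fun buckets idx =>
      match tpi.get? idx with
      | none => buckets
      | some tags =>
        if tags = [] then buckets else
        tags.foldl (fun buckets tag =>
          let normalized_tag := PySem.Str.lower (PySem.Str.strip tag)
          if normalized_tag = "" then buckets else
          let buckets' := buckets.setdefault normalized_tag []
          let bucket := buckets'.getD normalized_tag []
          if idx ∈ bucket then buckets'
          else buckets'.insert normalized_tag (bucket ++ [idx])) buckets) PySem.Dict.empty
  let clusters : List (String × List Int) :=
    buckets.items.foldl (fun clusters tb =>
      let su := tb.2.foldl (fun (su : PySem.Set Int × List Int) v =>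
        if PySem.Set.contains su.1 v then su
        else (PySem.Set.add su.1 v, su.2 ++ [v])) (PySem.Set.empty, [])
      if min_cluster_size ≤ (su.2.length : Int) then clusters ++ [(tb.1, su.2)] else clusters) []
  PySem.List.sorted2 clusters (fun item => -(item.2.length : Int)) (fun item => item.1) false


-- ===== PORT B =====
-- run-scan grouping of the sorted pair list (B's while-loop over runs of equal tags)
def pvGroupRuns : List (String × Int) → List (String × List Int)
  | [] => []
  | p :: rest =>
    (p.1, p.2 :: (rest.takeWhile (fun q => q.1 == p.1)).map (·.2)) ::
    pvGroupRuns (rest.dropWhile (fun q => q.1 == p.1))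
termination_by l => l.length
decreasing_by
  simpa using Nat.lt_succ_of_le (List.length_dropWhile_le _ _)

def cluster_by_tag_py_alt (indices : List Int) (tags_per_index : List (Int × List String)) (min_cluster_size : Int) : List (String × List Int) :=
  let tpi : PySem.Dict Int (List String) := PySem.Dict.mk tags_per_index
  let pairs : List (String × Int) :=
    indices.foldl (fun pairs idx =>
      match tpi.get? idx with
      | none => pairs
      | some tags =>
        tags.foldl (fun pairs tag =>
          let nt := PySem.Str.lower (PySem.Str.strip tag)
          if nt = "" then pairs else pairs ++ [(nt, idx)]) pairs) []
  let sortedPairs := PySem.List.sorted pairs (fun p => p.1) false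
  let clusters : List (String × List Int) :=
    (pvGroupRuns sortedPairs).foldl (fun clusters g =>
      let uniq := PySem.List.dedup g.2
      if min_cluster_size ≤ (uniq.length : Int) then clusters ++ [(g.1, uniq)] else clusters) []
  PySem.List.sorted2 clusters (fun item => -(item.2.length : Int)) (fun item => item.1) false


-- ===== PRECONDITION & SPEC =====
def Spec_cluster_by_tag_py (indices : List Int) (tags_per_index : List (Int × List String)) (min_cluster_size : Int) (out : List (String × List Int)) : Prop := out = cluster_by_tag_py_alt indices tags_per_index min_cluster_size
instance (indices : List Int) (tags_per_index : List (Int × List String)) (min_cluster_size : Int) (out : List (String × List Int)) : Decidable (Spec_cluster_by_tag_py indices tags_per_index min_cluster_size out) := by unfold Spec_cluster_by_tag_py; infer_instance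

-- ===== CLAIM (what is proved, stated in full; the proofs are below) =====
def Claim_equal_cluster_by_tag_py : Prop := ∀ (indices : List Int) (tags_per_index : List (Int × List String)) (min_cluster_size : Int), Dom_cluster_by_tag_py indices tags_per_index min_cluster_size → Spec_cluster_by_tag_py indices tags_per_index min_cluster_size (cluster_by_tag_py indices tags_per_index min_cluster_size)

-- ===== LEMMAS AND PROOFS =====

-- ---- proof-side abbreviations ----
def pvNorm (tag : String) : String := PySem.Str.lower (PySem.Str.strip tag)

def pvPairs (indices : List Int) (tpiL : List (Int × List String)) : List (String × Int) :=
  indices.flatMap (fun idx =>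
    match (PySem.Dict.mk tpiL).get? idx with
    | none => []
    | some tags => tags.flatMap (fun tag => if pvNorm tag = "" then [] else [(pvNorm tag, idx)]))

def pvStepM (d : PySem.Dict String (List Int)) (q : String × Int) : PySem.Dict String (List Int) :=
  d.modify q.1 [] (fun b => PySem.Set.add b q.2)

def pvIdxs (P : List (String × Int)) (t : String) : List Int :=
  (P.filter (fun q => q.1 == t)).map (·.2)

def pvKey (item : String × List Int) : Lex (Int × String) := toLex (-(item.2.length : Int), item.1)

def pvOut (P : List (String × Int)) (m : Int) (TS : List String) : List (String × List Int) :=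
  PySem.List.sorted
    ((TS.filter (fun t => decide (m ≤ ((PySem.List.dedup (pvIdxs P t)).length : Int)))).map
      (fun t => (t, PySem.List.dedup (pvIdxs P t)))) pvKey false

-- ---- generic helpers ----
theorem pvIte_decide {γ : Type} (c : Prop) [Decidable c] (a b : γ) :
    (if c then a else b) = (if decide c = true then a else b) := by
  by_cases h : c <;> simp [h]

theorem pvFoldl_congr_inv {β γ : Type} (Inv : γ → Prop) (f g : γ → β → γ)
    (h : ∀ d p, Inv d → f d p = g d p ∧ Inv (g d p)) :
    ∀ (L : List β) (d : γ), Inv d → L.foldl f d = L.foldl g d := by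
  intro L
  induction L with
  | nil => intro d _; rfl
  | cons p L ih =>
    intro d hd
    simp only [List.foldl_cons]
    rw [(h d p hd).1]
    exact ih _ (h d p hd).2

-- ---- A-side: dict loop ----
theorem pvInsert_getD_self (d : PySem.Dict String (List Int)) (k : String)
    (hc : d.contains k = true) (hnd : d.keys.Nodup) : d.insert k (d.getD k []) = d := by
  apply PySem.Dict.ext
  rw [PySem.Dict.items_insert_of_contains _ _ hc]
  have : ∀ p ∈ d.items, (fun p : String × List Int => if (p.1 == k) = true then (k, d.getD k []) else p) p = id p := by
    intro p hp
    by_cases h : p.1 = k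
    · have hmem : (k, p.2) ∈ d.items := by rw [← h]; exact hp
      simp only [h, BEq.rfl, if_true, id]
      rw [PySem.Dict.getD_of_mem_items d hmem hnd []]
      simp [← h]
    · simp [h, id]
  rw [List.map_congr_left this, List.map_id]

theorem pvStep1_eq (d : PySem.Dict String (List Int)) (t : String) (i : Int) (hnd : d.keys.Nodup) :
    (if i ∈ (d.setdefault t []).getD t []
     then d.setdefault t []
     else (d.setdefault t []).insert t ((d.setdefault t []).getD t [] ++ [i])) = pvStepM d (t, i) ∧
    (pvStepM d (t, i)).keys.Nodup := by
  have hq1 : (t, i).1 = t := rfl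
  have hq2 : (t, i).2 = i := rfl
  constructor
  · simp only [pvStepM, PySem.Dict.modify, PySem.Set.add]
    by_cases hc : d.contains t = true
    · rw [PySem.Dict.setdefault_of_contains d [] hc]
      by_cases hm : i ∈ d.getD t []
      · have hct : PySem.Set.contains (d.getD t []) i = true := by
          rw [PySem.Set.contains_eq_decide]; simpa using hm
        simp only [hm, if_true, hct]
        exact (pvInsert_getD_self d t hc hnd).symm
      · simp [hm, PySem.Set.contains]
    · have hc' : d.contains t = false := by simpa using hc
      rw [PySem.Dict.setdefault_of_not_contains d [] hc']
      rw [PySem.Dict.getD_insert_self]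
      rw [PySem.Dict.getD_of_not_contains _ _ hc']
      simp [PySem.Dict.insert_insert_self]
  · rw [pvStepM, PySem.Dict.keys_modify]
    by_cases hc : d.contains t = true
    · rw [PySem.Dict.keys_insert_of_contains _ _ hc]; exact hnd
    · have hc' : d.contains t = false := by simpa using hc
      rw [PySem.Dict.keys_insert_of_not_contains _ _ hc']
      have : t ∉ d.keys := by
        rw [← PySem.Dict.contains_iff_mem_keys] at *
        simp [hc']
      simp only [List.nodup_append, List.nodup_cons, List.nodup_nil, and_true]
      refine ⟨hnd, ⟨by simp, ?_⟩⟩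
      intro a ha b hb
      simp only [List.mem_singleton] at hb
      subst hb
      exact fun h => this (h ▸ ha)

set_option maxHeartbeats 1600000 in
theorem pvBucketsA_eq (indices : List Int) (tpiL : List (Int × List String)) :
    (indices.foldl (fun buckets idx =>
      match (PySem.Dict.mk tpiL).get? idx with
      | none => buckets
      | some tags =>
        if tags = [] then buckets else
        tags.foldl (fun buckets tag =>
          let normalized_tag := pvNorm tag
          if normalized_tag = "" then buckets else
          let buckets' := buckets.setdefault normalized_tag []
          let bucket := buckets'.getD normalized_tag []
          if idx ∈ bucket then buckets'
          else buckets'.insert normalized_tag (bucket ++ [idx])) buckets) PySem.Dict.empty) =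
    (pvPairs indices tpiL).foldl pvStepM PySem.Dict.empty := by
  have hinner : ∀ (idx : Int) (tags : List String) (d : PySem.Dict String (List Int)), d.keys.Nodup →
      tags.foldl (fun buckets tag =>
          let normalized_tag := pvNorm tag
          if normalized_tag = "" then buckets else
          let buckets' := buckets.setdefault normalized_tag []
          let bucket := buckets'.getD normalized_tag []
          if idx ∈ bucket then buckets'
          else buckets'.insert normalized_tag (bucket ++ [idx])) d =
      tags.foldl (fun d tag => if pvNorm tag = "" then d else pvStepM d (pvNorm tag, idx)) d ∧
      (tags.foldl (fun d tag => if pvNorm tag = "" then d else pvStepM d (pvNorm tag, idx)) d).keys.Nodup := by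
    intro idx tags
    induction tags with
    | nil =>
      intro d hd
      refine ⟨by simp only [List.foldl_nil], by simp only [List.foldl_nil]; exact hd⟩
    | cons tag tags ih =>
      intro d hd
      simp only [List.foldl_cons]
      by_cases h : pvNorm tag = ""
      · rw [if_pos h, if_pos h]
        exact ih d hd
      · rw [if_neg h, if_neg h, (pvStep1_eq d (pvNorm tag) idx hd).1]
        exact ih _ (pvStep1_eq d (pvNorm tag) idx hd).2
  have h1 : ∀ (L : List Int) (d : PySem.Dict String (List Int)), d.keys.Nodup →
      L.foldl (fun buckets idx =>
        match (PySem.Dict.mk tpiL).get? idx with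
        | none => buckets
        | some tags =>
          if tags = [] then buckets else
          tags.foldl (fun buckets tag =>
            let normalized_tag := pvNorm tag
            if normalized_tag = "" then buckets else
            let buckets' := buckets.setdefault normalized_tag []
            let bucket := buckets'.getD normalized_tag []
            if idx ∈ bucket then buckets'
            else buckets'.insert normalized_tag (bucket ++ [idx])) buckets) d =
      L.foldl (fun buckets idx =>
        match (PySem.Dict.mk tpiL).get? idx with
        | none => buckets
        | some tags => tags.foldl (fun d tag => if pvNorm tag = "" then d else pvStepM d (pvNorm tag, idx)) buckets) d := by
    intro L
    induction L with
    | nil => intro d _; simp only [List.foldl_nil]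
    | cons idx L ih =>
      intro d hd
      simp only [List.foldl_cons]
      cases hx : (PySem.Dict.mk tpiL).get? idx with
      | none =>
        exact ih d hd
      | some tags =>
        by_cases htags : tags = []
        · subst htags
          simp only [List.foldl_nil]
          exact ih d hd
        · obtain ⟨heq, hinv⟩ := hinner idx tags d hd
          simp only [if_neg htags, heq]
          exact ih _ hinv
  have h2 : ∀ (L : List Int) (d : PySem.Dict String (List Int)),
      L.foldl (fun buckets idx =>
        match (PySem.Dict.mk tpiL).get? idx with
        | none => buckets
        | some tags => tags.foldl (fun d tag => if pvNorm tag = "" then d else pvStepM d (pvNorm tag, idx)) buckets) d =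
      (L.flatMap (fun idx =>
        match (PySem.Dict.mk tpiL).get? idx with
        | none => []
        | some tags => tags.flatMap (fun tag => if pvNorm tag = "" then [] else [(pvNorm tag, idx)]))).foldl pvStepM d := by
    intro L d
    rw [List.foldl_flatMap]
    apply pvFoldl_congr_inv (fun _ => True) _ _ ?_ L d trivial
    intro d idx _
    refine ⟨?_, trivial⟩
    cases hx : (PySem.Dict.mk tpiL).get? idx with
    | none => simp only [List.foldl_nil]
    | some tags =>
      rw [List.foldl_flatMap]
      apply pvFoldl_congr_inv (fun _ => True) _ _ ?_ tags d trivial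
      intro d tag _
      refine ⟨?_, trivial⟩
      by_cases h : pvNorm tag = "" <;> simp [h]
  rw [h1 indices PySem.Dict.empty (by simp), h2]
  simp only [pvPairs]

theorem pvGetD_foldl (L : List (String × Int)) :
    ∀ (d : PySem.Dict String (List Int)) (t : String),
      (L.foldl pvStepM d).getD t [] = PySem.Set.update (d.getD t []) (pvIdxs L t) := by
  induction L with
  | nil => intro d t; simp [pvIdxs, PySem.Set.update]
  | cons q L ih =>
    intro d t
    rw [List.foldl_cons, ih (pvStepM d q) t]
    have hq : (pvStepM d q).getD t [] =
        if t = q.1 then PySem.Set.add (d.getD q.1 []) q.2 else d.getD t [] := by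
      rw [pvStepM, PySem.Dict.getD_modify]
    by_cases h : q.1 = t
    · subst h
      rw [hq, if_pos rfl,
        show pvIdxs (q :: L) q.1 = q.2 :: pvIdxs L q.1 from by simp [pvIdxs],
        PySem.Set.update_cons]
    · rw [hq, if_neg (Ne.symm h),
        show pvIdxs (q :: L) t = pvIdxs L t from by simp [pvIdxs, h]]

theorem pvKeys_foldl (L : List (String × Int)) :
    (L.foldl pvStepM PySem.Dict.empty).keys = PySem.List.dedup (L.map (·.1)) := by
  have h2 : (L.foldl pvStepM PySem.Dict.empty).keys =
      PySem.Set.update PySem.Dict.empty.keys (L.map (fun q => q.1)) :=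
    PySem.Dict.keys_foldl_modify_key L (fun q => q.1) ([] : List Int)
      (fun _ q => fun b => PySem.Set.add b q.2) PySem.Dict.empty
  rw [h2, PySem.Dict.keys_empty]
  rw [show PySem.Set.update [] (L.map (fun q => q.1)) =
      PySem.Set.ofList (L.map (fun q => q.1)) from PySem.Set.update_empty _]
  simp

theorem pvItems_eq_keys_map (d : PySem.Dict String (List Int)) (hnd : d.keys.Nodup) :
    d.items = d.keys.map (fun k => (k, d.getD k [])) := by
  show d.items = (d.items.map (·.1)).map (fun k => (k, d.getD k []))
  rw [List.map_map]
  have : ∀ p ∈ d.items, ((fun k => (k, d.getD k [])) ∘ (·.1)) p = id p := by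
    intro p hp
    have : d.getD p.1 [] = p.2 := PySem.Dict.getD_of_mem_items d hp hnd []
    simp [Function.comp, this]
  rw [List.map_congr_left this, List.map_id]

theorem pvSeenFold (l : List Int) :
    ∀ (s : PySem.Set Int) (u : List Int), (∀ x ∈ l, PySem.Set.contains s x = false) → l.Nodup →
      l.foldl (fun (su : PySem.Set Int × List Int) v =>
        if PySem.Set.contains su.1 v then su
        else (PySem.Set.add su.1 v, su.2 ++ [v])) (s, u) = (s.update l, u ++ l) := by
  induction l with
  | nil => intro s u _ _; simp [PySem.Set.update]
  | cons x l ih =>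
    intro s u hnot hnd
    have hx : PySem.Set.contains s x = false := hnot x (by simp)
    simp only [List.foldl_cons, hx, if_neg, Bool.false_eq_true, not_false_iff]
    rw [PySem.Set.update_cons]
    have hnot' : ∀ y ∈ l, PySem.Set.contains (s.add x) y = false := by
      intro y hy
      rw [PySem.Set.contains_eq_decide]
      have hys : y ∉ s := by
        have := hnot y (by simp [hy])
        rw [PySem.Set.contains_eq_decide] at this
        simpa using this
      have hyx : y ≠ x := fun h => (List.nodup_cons.mp hnd).1 (h ▸ hy)
      simp [PySem.Set.mem_add, hys, hyx]
    rw [ih (s.add x) (u ++ [x]) hnot' (List.nodup_cons.mp hnd).2]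
    simp

-- ---- sort lemmas ----
theorem pvSorted2_eq_sorted (xs : List (String × List Int)) :
    PySem.List.sorted2 xs (fun item => -(item.2.length : Int)) (fun item => item.1) false =
    PySem.List.sorted xs pvKey false := by
  rw [PySem.List.sorted_eq_foldl_insertBy]
  unfold PySem.List.sorted2
  simp only [Bool.false_eq_true, if_false]
  have hbf : (fun (a b : String × List Int) =>
        decide ((-(a.2.length : Int)) < -(b.2.length : Int)) ||
          (!decide ((-(b.2.length : Int)) < -(a.2.length : Int)) && decide (a.1 < b.1))) =
      (fun a b => decide (pvKey a < pvKey b)) := by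
    funext a b
    rcases lt_trichotomy (-(a.2.length : Int)) (-(b.2.length : Int)) with h | h | h
    · simp [pvKey, Prod.Lex.lt_iff, h, lt_asymm h]
    · simp [pvKey, Prod.Lex.lt_iff, h]
    · simp [pvKey, Prod.Lex.lt_iff, lt_asymm h, h, h.ne']
  rw [hbf]

theorem pvFilter_insertBy {α κ : Type} [LinearOrder κ] (key : α → κ) (t : κ) (x : α) (l : List α)
    (hs : l.Pairwise (fun a b => key a ≤ key b)) :
    (PySem.List.insertBy (fun a b => decide (key a < key b)) x l).filter (fun a => decide (key a = t)) =
    l.filter (fun a => decide (key a = t)) ++ (if key x = t then [x] else []) := by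
  induction l with
  | nil => by_cases h : key x = t <;> simp [PySem.List.insertBy, h]
  | cons b l ih =>
    rw [PySem.List.insertBy]
    by_cases hb : key x < key b
    · simp only [hb, decide_true, if_true]
      have hnil : ∀ y ∈ b :: l, key x < key y := by
        intro y hy
        rcases List.mem_cons.mp hy with rfl | hy'
        · exact hb
        · exact lt_of_lt_of_le hb ((List.pairwise_cons.mp hs).1 y hy')
      by_cases h : key x = t
      · have : (b :: l).filter (fun a => decide (key a = t)) = [] := by
          rw [List.filter_eq_nil_iff]
          intro y hy
          have := hnil y hy
          simp only [decide_eq_true_eq]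
          exact fun he => (ne_of_gt this) (he.trans h.symm)
        simp [h, this]
      · simp [List.filter_cons, h]
    · simp only [hb, decide_false, Bool.false_eq_true, if_false]
      rw [List.filter_cons, List.filter_cons, ih (List.pairwise_cons.mp hs).2]
      by_cases hbt : key b = t <;> simp [hbt]

theorem pvSorted_filter_key {α κ : Type} [LinearOrder κ] (key : α → κ) (t : κ) :
    ∀ xs : List α, (PySem.List.sorted xs key false).filter (fun a => decide (key a = t)) =
      xs.filter (fun a => decide (key a = t)) := by
  intro xs
  induction xs using List.reverseRecOn with
  | nil => rw [PySem.List.sorted_eq_foldl_insertBy]; simp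
  | append_singleton xs x ih =>
    rw [PySem.List.sorted_eq_foldl_insertBy, List.foldl_append, List.foldl_cons, List.foldl_nil,
      ← PySem.List.sorted_eq_foldl_insertBy]
    rw [pvFilter_insertBy key t x _ (PySem.List.sorted_pairwise xs key)]
    rw [ih, List.filter_append]
    congr 1
    by_cases h : key x = t <;> simp [h]

theorem pvIdxs_sorted (P : List (String × Int)) (t : String) :
    pvIdxs (PySem.List.sorted P (fun p => p.1) false) t = pvIdxs P t := by
  have hpred : (fun (q : String × Int) => q.1 == t) = (fun q => decide (q.1 = t)) := by
    funext q; by_cases h : q.1 = t <;> simp [h]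
  simp only [pvIdxs, hpred]
  rw [pvSorted_filter_key (fun (q : String × Int) => q.1) t P]

theorem pvSorted_congr {α κ : Type} [LinearOrder κ] (key : α → κ) (xs ys : List α)
    (hp : xs.Perm ys) (hnd : (xs.map key).Nodup) :
    PySem.List.sorted xs key false = PySem.List.sorted ys key false := by
  have hzp : (PySem.List.sorted xs key false).Perm xs := PySem.List.sorted_perm xs key false
  have hle := PySem.List.sorted_pairwise xs key
  have hndz : ((PySem.List.sorted xs key false).map key).Nodup :=
    ((hzp.map key).nodup_iff).mpr hnd
  have hne : (PySem.List.sorted xs key false).Pairwise (fun a b => key a ≠ key b) :=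
    (List.pairwise_map.mp hndz)
  have hlt : (PySem.List.sorted xs key false).Pairwise (fun a b => key a < key b) :=
    (hle.and hne).imp (fun h => lt_of_le_of_ne h.1 h.2)
  exact (PySem.List.sorted_eq_of_perm_of_pairwise_lt ys (PySem.List.sorted xs key false) key
    (hzp.trans hp) hlt).symm

-- ---- run grouping ----
theorem pvDropWhile_gt (c : String) :
    ∀ rest : List (String × Int), rest.Pairwise (fun a b => a.1 ≤ b.1) →
      (∀ q ∈ rest, c ≤ q.1) → ∀ q ∈ rest.dropWhile (fun q => q.1 == c), c < q.1 := by
  intro rest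
  induction rest with
  | nil => intro _ _ q hq; simp at hq
  | cons a rest ih =>
    intro hp hle q hq
    by_cases ha : a.1 = c
    · rw [List.dropWhile_cons_of_pos (by simp [ha])] at hq
      exact ih (List.pairwise_cons.mp hp).2 (fun q hq => hle q (by simp [hq])) q hq
    · rw [List.dropWhile_cons_of_neg (by simp [ha])] at hq
      have hca : c < a.1 := lt_of_le_of_ne (hle a (by simp)) (Ne.symm ha)
      rcases List.mem_cons.mp hq with rfl | hq'
      · exact hca
      · exact lt_of_lt_of_le hca ((List.pairwise_cons.mp hp).1 q hq')

theorem pvGroupRuns_sorted :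
    ∀ (n : Nat) (L : List (String × Int)), L.length ≤ n → L.Pairwise (fun a b => a.1 ≤ b.1) →
      ∃ TS : List String, TS.Nodup ∧ (∀ t, t ∈ TS ↔ t ∈ L.map (·.1)) ∧
        pvGroupRuns L = TS.map (fun t => (t, pvIdxs L t)) := by
  intro n
  induction n with
  | zero =>
    intro L hlen _
    have : L = [] := List.eq_nil_of_length_eq_zero (Nat.le_zero.mp hlen)
    subst this
    exact ⟨[], List.nodup_nil, by simp, by rw [pvGroupRuns]; simp⟩
  | succ n ih =>
    intro L hlen hp
    cases L with
    | nil => exact ⟨[], List.nodup_nil, by simp, by rw [pvGroupRuns]; simp⟩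
    | cons p rest =>
      have hgr : rest.takeWhile (fun q => q.1 == p.1) ++ rest.dropWhile (fun q => q.1 == p.1) = rest :=
        List.takeWhile_append_dropWhile
      have hg : ∀ q ∈ rest.takeWhile (fun q => q.1 == p.1), q.1 = p.1 := by
        intro q hq
        simpa using List.mem_takeWhile_imp hq
      have hle : ∀ q ∈ rest, p.1 ≤ q.1 := fun q hq => (List.pairwise_cons.mp hp).1 q hq
      have hrest : rest.Pairwise (fun a b => a.1 ≤ b.1) := (List.pairwise_cons.mp hp).2
      have hr : ∀ q ∈ rest.dropWhile (fun q => q.1 == p.1), p.1 < q.1 :=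
        pvDropWhile_gt p.1 rest hrest hle
      have hrpair : (rest.dropWhile (fun q => q.1 == p.1)).Pairwise (fun a b => a.1 ≤ b.1) :=
        hrest.sublist (List.dropWhile_sublist _)
      have hlenr : (rest.dropWhile (fun q => q.1 == p.1)).length ≤ n := by
        have h1 := List.length_dropWhile_le (fun (q : String × Int) => q.1 == p.1) rest
        simp only [List.length_cons] at hlen
        omega
      obtain ⟨TS', hnd', hmem', heq'⟩ := ih _ hlenr hrpair
      have hTSne : ∀ t ∈ TS', p.1 < t := by
        intro t ht
        rcases List.mem_map.mp ((hmem' t).mp ht) with ⟨q, hq, rfl⟩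
        exact hr q hq
      refine ⟨p.1 :: TS', ?_, ?_, ?_⟩
      · exact List.nodup_cons.mpr ⟨fun h => absurd (hTSne _ h) (lt_irrefl _), hnd'⟩
      · intro t
        simp only [List.mem_cons, List.map_cons, hmem']
        constructor
        · rintro (rfl | ht)
          · exact Or.inl rfl
          · rcases List.mem_map.mp ht with ⟨q, hq, rfl⟩
            refine Or.inr (List.mem_map.mpr ⟨q, ?_, rfl⟩)
            rw [← hgr]
            exact List.mem_append_right _ hq
        · rintro (rfl | ht)
          · exact Or.inl rfl
          · rcases List.mem_map.mp ht with ⟨q, hq, rfl⟩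
            rw [← hgr] at hq
            rcases List.mem_append.mp hq with hq' | hq'
            · exact Or.inl (hg q hq')
            · exact Or.inr (List.mem_map.mpr ⟨q, hq', rfl⟩)
      · rw [pvGroupRuns, heq', List.map_cons]
        congr 1
        · have hfg : (rest.takeWhile (fun q => q.1 == p.1)).filter (fun q => q.1 == p.1) =
              rest.takeWhile (fun q => q.1 == p.1) :=
            List.filter_eq_self.mpr (fun q hq => by simp [hg q hq])
          have hfr : (rest.dropWhile (fun q => q.1 == p.1)).filter (fun q => q.1 == p.1) = [] :=
            List.filter_eq_nil_iff.mpr (fun q hq => by simp [ne_of_gt (hr q hq)])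
          have hfilter : (p :: rest).filter (fun q => q.1 == p.1) =
              p :: rest.takeWhile (fun q => q.1 == p.1) := by
            conv_lhs => rw [← hgr]
            rw [List.filter_cons, if_pos (by simp), List.filter_append, hfg, hfr, List.append_nil]
          simp only [pvIdxs, hfilter, List.map_cons]
        · apply List.map_congr_left
          intro t ht
          have htp : p.1 ≠ t := ne_of_lt (hTSne t ht)
          have hfp : ((p :: rest).filter (fun q => q.1 == t)) =
              (rest.dropWhile (fun q => q.1 == p.1)).filter (fun q => q.1 == t) := by
            conv_lhs => rw [← hgr]
            rw [List.filter_cons, if_neg (by simp [htp]), List.filter_append,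
              List.filter_eq_nil_iff.mpr (fun q hq => by simp [hg q hq, htp]), List.nil_append]
          simp only [pvIdxs, hfp]

-- ---- assembling both sides ----
theorem pvClustersA (T : List String) (Bk : String → List Int) (hnod : ∀ t, (Bk t).Nodup) (m : Int) :
    (T.map (fun t => (t, Bk t))).foldl (fun clusters tb =>
      if m ≤ (((tb.2.foldl (fun (su : PySem.Set Int × List Int) v =>
            if PySem.Set.contains su.1 v then su
            else (PySem.Set.add su.1 v, su.2 ++ [v])) (PySem.Set.empty, []))).2.length : Int)
      then clusters ++ [(tb.1, (tb.2.foldl (fun (su : PySem.Set Int × List Int) v =>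
            if PySem.Set.contains su.1 v then su
            else (PySem.Set.add su.1 v, su.2 ++ [v])) (PySem.Set.empty, [])).2)]
      else clusters) [] =
    (T.filter (fun t => decide (m ≤ ((Bk t).length : Int)))).map (fun t => (t, Bk t)) := by
  have hseen : ∀ t, (Bk t).foldl (fun (su : PySem.Set Int × List Int) v =>
      if PySem.Set.contains su.1 v then su
      else (PySem.Set.add su.1 v, su.2 ++ [v])) (PySem.Set.empty, []) =
      (PySem.Set.update PySem.Set.empty (Bk t), [] ++ Bk t) :=
    fun t => pvSeenFold (Bk t) PySem.Set.empty [] (fun x _ => rfl) (hnod t)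
  have hstep : ∀ (acc : List (String × List Int)), ∀ tb ∈ T.map (fun t => (t, Bk t)),
      (if m ≤ (((tb.2.foldl (fun (su : PySem.Set Int × List Int) v =>
            if PySem.Set.contains su.1 v then su
            else (PySem.Set.add su.1 v, su.2 ++ [v])) (PySem.Set.empty, []))).2.length : Int)
      then acc ++ [(tb.1, (tb.2.foldl (fun (su : PySem.Set Int × List Int) v =>
            if PySem.Set.contains su.1 v then su
            else (PySem.Set.add su.1 v, su.2 ++ [v])) (PySem.Set.empty, [])).2)]
      else acc) =
      (if (fun tb : String × List Int => decide (m ≤ (tb.2.length : Int))) tb = true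
       then acc ++ [(fun tb : String × List Int => tb) tb] else acc) := by
    intro acc tb htb
    rcases List.mem_map.mp htb with ⟨t, _, rfl⟩
    rw [hseen t]
    simp only [List.nil_append]
    rw [pvIte_decide]
  rw [PySem.List.foldl_congr_mem _ _ _ [] hstep, PySem.List.foldl_append_if]
  simp only [List.nil_append, List.map_id']
  rw [List.filter_map]
  congr 1

theorem pvClustersB (G : List (String × List Int)) (m : Int) :
    G.foldl (fun clusters g =>
      if m ≤ ((PySem.List.dedup g.2).length : Int)
      then clusters ++ [(g.1, PySem.List.dedup g.2)] else clusters) [] =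
    (G.filter (fun g => decide (m ≤ ((PySem.List.dedup g.2).length : Int)))).map
      (fun g => (g.1, PySem.List.dedup g.2)) := by
  have hstep : ∀ (acc : List (String × List Int)), ∀ g ∈ G,
      (if m ≤ ((PySem.List.dedup g.2).length : Int)
       then acc ++ [(g.1, PySem.List.dedup g.2)] else acc) =
      (if (fun g : String × List Int => decide (m ≤ ((PySem.List.dedup g.2).length : Int))) g = true
       then acc ++ [(fun g : String × List Int => (g.1, PySem.List.dedup g.2)) g] else acc) := by
    intro acc g _
    rw [pvIte_decide]
  rw [PySem.List.foldl_congr_mem _ _ _ [] hstep, PySem.List.foldl_append_if]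
  simp

theorem pvPairsB_eq (indices : List Int) (tpiL : List (Int × List String)) :
    (indices.foldl (fun pairs idx =>
      match (PySem.Dict.mk tpiL).get? idx with
      | none => pairs
      | some tags =>
        tags.foldl (fun pairs tag =>
          let nt := pvNorm tag
          if nt = "" then pairs else pairs ++ [(nt, idx)]) pairs) []) = pvPairs indices tpiL := by
  have hinner : ∀ (idx : Int) (tags : List String) (acc : List (String × Int)),
      tags.foldl (fun pairs tag =>
        let nt := pvNorm tag
        if nt = "" then pairs else pairs ++ [(nt, idx)]) acc =
      acc ++ tags.flatMap (fun tag => if pvNorm tag = "" then [] else [(pvNorm tag, idx)]) := by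
    intro idx tags
    induction tags with
    | nil => intro acc; simp
    | cons tag tags ih =>
      intro acc
      simp only [List.foldl_cons, List.flatMap_cons]
      by_cases h : pvNorm tag = ""
      · rw [if_pos h, ih]; simp [h]
      · rw [if_neg h, ih]; simp [h]
  have houter : ∀ (L : List Int) (acc : List (String × Int)),
      L.foldl (fun pairs idx =>
        match (PySem.Dict.mk tpiL).get? idx with
        | none => pairs
        | some tags =>
          tags.foldl (fun pairs tag =>
            let nt := pvNorm tag
            if nt = "" then pairs else pairs ++ [(nt, idx)]) pairs) acc =
      acc ++ L.flatMap (fun idx =>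
        match (PySem.Dict.mk tpiL).get? idx with
        | none => []
        | some tags => tags.flatMap (fun tag => if pvNorm tag = "" then [] else [(pvNorm tag, idx)])) := by
    intro L
    induction L with
    | nil => intro acc; simp
    | cons idx L ih =>
      intro acc
      simp only [List.foldl_cons, List.flatMap_cons]
      cases hx : (PySem.Dict.mk tpiL).get? idx with
      | none => simp only []; rw [ih]; simp
      | some tags => simp only []; rw [hinner idx tags acc, ih]; simp
  rw [houter indices []]
  simp [pvPairs]

theorem pvA_eq (indices : List Int) (tpiL : List (Int × List String)) (m : Int) :
    cluster_by_tag_py indices tpiL m =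
    pvOut (pvPairs indices tpiL) m (PySem.List.dedup ((pvPairs indices tpiL).map (·.1))) := by
  have hb := pvBucketsA_eq indices tpiL
  simp only [pvNorm] at hb
  simp only [cluster_by_tag_py]
  rw [hb]
  have hnd : ((pvPairs indices tpiL).foldl pvStepM PySem.Dict.empty).keys.Nodup := by
    rw [pvKeys_foldl]; exact PySem.List.nodup_dedup _
  have hgetD : ∀ t, ((pvPairs indices tpiL).foldl pvStepM PySem.Dict.empty).getD t [] =
      PySem.List.dedup (pvIdxs (pvPairs indices tpiL) t) := by
    intro t
    rw [pvGetD_foldl, PySem.Dict.getD_empty]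
    show PySem.Set.update PySem.Set.empty _ = _
    rw [PySem.Set.update_empty]
    simp
  have hitems : ((pvPairs indices tpiL).foldl pvStepM PySem.Dict.empty).items =
      (PySem.List.dedup ((pvPairs indices tpiL).map (·.1))).map
        (fun t => (t, PySem.List.dedup (pvIdxs (pvPairs indices tpiL) t))) := by
    rw [pvItems_eq_keys_map _ hnd, pvKeys_foldl]
    exact List.map_congr_left (fun t _ => by rw [hgetD t])
  rw [hitems, pvClustersA _ _ (fun t => PySem.List.nodup_dedup _) m, pvSorted2_eq_sorted]
  simp only [pvOut]

theorem pvB_eq (indices : List Int) (tpiL : List (Int × List String)) (m : Int) :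
    ∃ TS : List String, TS.Nodup ∧ (∀ t, t ∈ TS ↔ t ∈ (pvPairs indices tpiL).map (·.1)) ∧
      cluster_by_tag_py_alt indices tpiL m = pvOut (pvPairs indices tpiL) m TS := by
  have hpairs := pvPairsB_eq indices tpiL
  simp only [pvNorm] at hpairs
  obtain ⟨TS, hnd, hmem, heq⟩ := pvGroupRuns_sorted
    (PySem.List.sorted (pvPairs indices tpiL) (fun p => p.1) false).length
    (PySem.List.sorted (pvPairs indices tpiL) (fun p => p.1) false) le_rfl
    (PySem.List.sorted_pairwise (pvPairs indices tpiL) (fun p => p.1))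
  refine ⟨TS, hnd, ?_, ?_⟩
  · intro t
    rw [hmem t]
    exact ((PySem.List.sorted_perm (pvPairs indices tpiL) (fun p => p.1) false).map (·.1)).mem_iff
  · simp only [cluster_by_tag_py_alt]
    rw [hpairs, heq, pvClustersB, List.filter_map, List.map_map, pvSorted2_eq_sorted]
    simp only [pvOut, Function.comp_def, pvIdxs_sorted]

theorem pvOut_congr (P : List (String × Int)) (m : Int) (T TS : List String)
    (hT : T.Nodup) (hTS : TS.Nodup) (hmem : ∀ t, t ∈ T ↔ t ∈ TS) :
    pvOut P m T = pvOut P m TS := by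
  simp only [pvOut]
  have hperm : T.Perm TS := (List.perm_ext_iff_of_nodup hT hTS).mpr hmem
  apply pvSorted_congr pvKey
  · exact (hperm.filter _).map _
  · rw [List.map_map]
    apply List.Nodup.map ?_ (hT.filter _)
    intro t1 t2 h12
    have := congrArg (fun x => (ofLex x).2) h12
    simpa [pvKey, Function.comp] using this

-- ===== VERDICT (by name: the statement is the Claim_ definition above) =====
theorem cluster_by_tag_py_spec : Claim_equal_cluster_by_tag_py := by
  intro indices tpiL m _
  unfold Spec_cluster_by_tag_py
  obtain ⟨TS, hTS, hmem, hB⟩ := pvB_eq indices tpiL m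
  rw [pvA_eq indices tpiL m, hB]
  exact pvOut_congr _ m _ TS (PySem.List.nodup_dedup _) hTS
    (fun t => by rw [PySem.List.mem_dedup]; exact (hmem t).symm)
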